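-- pv_equiv track=rewrite | github.com/jeltethefacer/Vmtranslator | VmTranslator.py | isComment
-- ===== SOURCE A (Python) =====
-- def isComment(string):
--     secondSlash = False
--     for x in string:
--         if x == "/" and secondSlash:
--             return True
--         elif x == "/":
--             secondSlash = True
--         elif not x.isspace():
--             return False
--     return True
-- ===== SOURCE B (Python) =====
-- def isComment(string):
--     prefix = [c for c in string if not c.isspace()][:2]
--     return all(c == "/" for c in prefix)
-- ===== Notes on version B (the rewrite author's own statement) =====
-- stated objective: simpler
-- what changed: Replaces A's secondSlash boolean state machine with mid-scan early returns by a filter-then-prefix-check decomposition: keep the non-whitespace characters, take the first two, and check that all of them are slash characters.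
import Mathlib
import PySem

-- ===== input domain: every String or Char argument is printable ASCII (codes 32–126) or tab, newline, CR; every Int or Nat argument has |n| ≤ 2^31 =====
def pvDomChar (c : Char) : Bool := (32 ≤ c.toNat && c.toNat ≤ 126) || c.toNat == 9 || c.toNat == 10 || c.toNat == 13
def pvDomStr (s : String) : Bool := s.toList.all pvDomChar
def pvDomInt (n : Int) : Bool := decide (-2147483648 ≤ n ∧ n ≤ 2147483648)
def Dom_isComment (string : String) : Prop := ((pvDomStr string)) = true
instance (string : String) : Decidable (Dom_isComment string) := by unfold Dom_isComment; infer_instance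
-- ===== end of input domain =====

-- B is a simpler decomposition: filter non-whitespace, take the first two, check all are '/'.

-- ===== PORT A =====
-- A's for-loop with the secondSlash flag and early returns, as structural recursion over the characters.
def isCommentLoop : List Char → Bool → Bool
  | [], _ => true
  | x :: xs, secondSlash =>
    if x = '/' ∧ secondSlash then true
    else if x = '/' then isCommentLoop xs true
    else if ¬ (PySem.Chars.isspace x) then false
    else isCommentLoop xs secondSlash

def isComment (string : String) : Bool := isCommentLoop string.toList false

-- ===== PORT B =====
def isComment_alt (string : String) : Bool :=
  ((string.toList.filter (fun c => ! PySem.Chars.isspace c)).take 2).all (· == '/')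

-- ===== PRECONDITION & SPEC =====
def Spec_isComment (string : String) (out : Bool) : Prop := out = isComment_alt string
instance (string : String) (out : Bool) : Decidable (Spec_isComment string out) := by unfold Spec_isComment; infer_instance

-- ===== CLAIM (what is proved, stated in full; the proofs are below) =====
def Claim_equal_isComment : Prop := ∀ (string : String), Dom_isComment string → Spec_isComment string (isComment string)

-- ===== LEMMAS AND PROOFS =====

-- Loop invariant: with the flag set, only one more non-space char may be '/'-checked.
theorem isCommentLoop_eq (l : List Char) (s : Bool) :
    isCommentLoop l s =
      ((l.filter (fun c => ! PySem.Chars.isspace c)).take (if s then 1 else 2)).all (· == '/') := by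
  induction l generalizing s with
  | nil => cases s <;> simp [isCommentLoop]
  | cons x xs ih =>
    by_cases hx : x = '/'
    · subst hx
      cases s with
      | false =>
        simp [isCommentLoop, ih, show PySem.Chars.isspace '/' = false by decide]
      | true =>
        simp [isCommentLoop, show PySem.Chars.isspace '/' = false by decide]
    · by_cases hs : PySem.Chars.isspace x
      · simp [isCommentLoop, hx, hs, ih]
      · cases s <;>
          simp [isCommentLoop, hx, hs, List.all_cons,
            show (x == '/') = false by simpa using hx]

-- ===== VERDICT (by name: the statement is the Claim_ definition above) =====
theorem isComment_spec : Claim_equal_isComment := by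
  intro string _
  unfold Spec_isComment isComment isComment_alt
  simpa using isCommentLoop_eq string.toList false
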